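-- pv_equiv track=rewrite | github.com/raylau1/mocha | util/rdlgenerator.py | register_is_u32_repr
-- ===== SOURCE A (Python) =====
-- def fields_ascending_by_lsb(register: dict) -> list[dict]:
--     """Sort a register's fields in ascending order of lsb."""
--     return sorted(register["fields"], key=lambda field: field["lsb"])
--
-- def register_is_u32_repr(reg: dict) -> bool:
--     """
--     Predicate that checks whether a register can be represented as a plain uint32_t, instead of its
--     own register type.
--     """
--     fields = reg["fields"]
--     if len(fields) == 1 and fields[0]["width"] == 32:
--         # register consists of a single 32-bit field
--         return True
--     if len(fields) == 32:
--         for i, field in enumerate(fields_ascending_by_lsb(reg)):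
--             if field["lsb"] != i or field["width"] != 1:
--                 return False
--         # register consists of 32 1-bit fields
--         return True
--     return False
-- ===== SOURCE B (Python) =====
-- def register_is_u32_repr(reg: dict) -> bool:
--     """
--     Predicate that checks whether a register can be represented as a plain uint32_t, instead of its
--     own register type.
--     """
--     fields = reg["fields"]
--     if len(fields) == 1:
--         return fields[0]["width"] == 32
--     if len(fields) == 32:
--         lsbs = {field["lsb"] for field in fields}
--         return all(field["width"] == 1 for field in fields) and lsbs == set(range(32))
--     return False
-- ===== Notes on version B (the rewrite author's own statement) =====
-- stated objective: simpler
-- what changed: B drops the sort-then-indexed-scan: the 1-field branch returns the width test directly, and the 32-field branch checks all widths are 1 and that the set of lsb values equals set(range(32)), with no sorting and no enumerate.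
import Mathlib
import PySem

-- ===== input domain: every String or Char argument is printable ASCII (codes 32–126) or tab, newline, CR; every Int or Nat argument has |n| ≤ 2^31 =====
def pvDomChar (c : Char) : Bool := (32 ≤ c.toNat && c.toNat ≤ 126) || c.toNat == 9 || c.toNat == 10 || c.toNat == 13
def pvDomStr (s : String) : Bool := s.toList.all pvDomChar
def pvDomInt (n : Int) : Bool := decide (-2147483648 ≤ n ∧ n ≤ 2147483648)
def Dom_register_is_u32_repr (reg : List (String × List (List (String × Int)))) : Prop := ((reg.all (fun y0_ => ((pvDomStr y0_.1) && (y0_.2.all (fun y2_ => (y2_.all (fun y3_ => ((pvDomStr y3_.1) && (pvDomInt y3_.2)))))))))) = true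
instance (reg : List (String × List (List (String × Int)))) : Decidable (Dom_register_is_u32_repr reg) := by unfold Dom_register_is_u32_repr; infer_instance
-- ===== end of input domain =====

-- B replaces A's sort-then-indexed-scan over the 32 fields by a single pass: all widths 1 and the
-- set of lsb values equal to set(range(32)); same return value on every input admitted by Pre_.

-- ===== PORT A =====
-- sorted(register["fields"], key=lambda field: field["lsb"]); dict lookups are ported as
-- first-match lookup with default 0 / [] — Pre_ admits only inputs where the keys Python reads exist.
def fields_ascending_by_lsb (register : List (String × List (List (String × Int)))) :
    List (List (String × Int)) :=
  PySem.List.sorted ((List.lookup "fields" register).getD [])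
    (fun field => (List.lookup "lsb" field).getD 0)

-- the 'for i, field in enumerate(fields_ascending_by_lsb(reg))' loop with its early 'return False'
def pvALoop32 (i : Int) : List (List (String × Int)) → Bool
  | [] => true
  | field :: rest =>
    if (List.lookup "lsb" field).getD 0 ≠ i ∨ (List.lookup "width" field).getD 0 ≠ 1 then false
    else pvALoop32 (i + 1) rest

def register_is_u32_repr (reg : List (String × List (List (String × Int)))) : Bool :=
  let fields := (List.lookup "fields" reg).getD []    -- reg["fields"]; KeyError excluded by Pre_
  if fields.length = 1 ∧ (List.lookup "width" (fields.headD [])).getD 0 = 32 then true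
  else if fields.length = 32 then pvALoop32 0 (fields_ascending_by_lsb reg)
  else false

-- ===== PORT B =====
def register_is_u32_repr_alt (reg : List (String × List (List (String × Int)))) : Bool :=
  let fields := (List.lookup "fields" reg).getD []    -- reg["fields"]; KeyError excluded by Pre_
  if fields.length = 1 then
    ((List.lookup "width" (fields.headD [])).getD 0 == 32)
  else if fields.length = 32 then
    let lsbs : PySem.Set Int :=
      PySem.Set.ofList (fields.map (fun field => (List.lookup "lsb" field).getD 0))
    fields.all (fun field => (List.lookup "width" field).getD 0 == 1) &&
      PySem.Set.equal lsbs (PySem.Set.ofList (PySem.List.pyRange 0 32))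
  else false

-- ===== PRECONDITION & SPEC =====
-- Pre_ excludes the inputs on which A raises KeyError (no "fields" key; a 1-field register whose
-- field lacks "width"; a 32-field register with a missing "lsb"); for 32-field registers it also
-- requires every field to carry "width", which A reads only lazily — on such inputs A may still
-- return False while B raises KeyError.
def Pre_register_is_u32_repr (reg : List (String × List (List (String × Int)))) : Prop :=
  let fields := (List.lookup "fields" reg).getD []
  (List.lookup "fields" reg).isSome = true ∧
  (fields.length = 1 → (List.lookup "width" (fields.headD [])).isSome = true) ∧
  (fields.length = 32 → ∀ field ∈ fields,
     (List.lookup "lsb" field).isSome = true ∧ (List.lookup "width" field).isSome = true)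

instance (reg : List (String × List (List (String × Int)))) : Decidable (Pre_register_is_u32_repr reg) := by
  unfold Pre_register_is_u32_repr; infer_instance

def pvWitness_register_is_u32_repr : (List (String × List (List (String × Int)))) :=
  [("fields", [[("width", 32)]])]

def Spec_register_is_u32_repr (reg : List (String × List (List (String × Int)))) (out : Bool) : Prop := out = register_is_u32_repr_alt reg
instance (reg : List (String × List (List (String × Int)))) (out : Bool) : Decidable (Spec_register_is_u32_repr reg out) := by unfold Spec_register_is_u32_repr; infer_instance

-- ===== CLAIM (what is proved, stated in full; the proofs are below) =====
def Claim_equal_register_is_u32_repr : Prop := ∀ (reg : List (String × List (List (String × Int)))), Dom_register_is_u32_repr reg → Pre_register_is_u32_repr reg → Spec_register_is_u32_repr reg (register_is_u32_repr reg)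

-- ===== LEMMAS AND PROOFS =====

-- the lsb / width of a field as both ports read them (lookup with default 0)
def pvLsb (field : List (String × Int)) : Int := (List.lookup "lsb" field).getD 0
def pvWidth (field : List (String × Int)) : Int := (List.lookup "width" field).getD 0

-- A's enumerate loop succeeds iff every position j carries lsb i+j and width 1
lemma pvALoop32_iff (l : List (List (String × Int))) (i : Int) :
    pvALoop32 i l = true ↔
      ∀ j : Nat, (h : j < l.length) → pvLsb l[j] = i + j ∧ pvWidth l[j] = 1 := by
  induction l generalizing i with
  | nil => simp [pvALoop32]
  | cons f rest ih =>
    by_cases hc : (List.lookup "lsb" f).getD 0 ≠ i ∨ (List.lookup "width" f).getD 0 ≠ 1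
    · rw [pvALoop32, if_pos hc]
      constructor
      · intro h; exact absurd h (by simp)
      · intro h
        have h0 := h 0 (by simp)
        simp only [List.getElem_cons_zero, pvLsb, pvWidth, Nat.cast_zero, add_zero] at h0
        rcases hc with h' | h'
        · exact absurd h0.1 h'
        · exact absurd h0.2 h'
    · rw [pvALoop32, if_neg hc]
      simp only [not_or, ne_eq, not_not] at hc
      rw [ih (i + 1)]
      constructor
      · intro h j hj
        cases j with
        | zero => simpa [pvLsb, pvWidth] using hc
        | succ j =>
          have hj' : j < rest.length := by simpa using Nat.lt_of_succ_lt_succ hj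
          have hr := h j hj'
          simp only [List.getElem_cons_succ]
          refine ⟨?_, hr.2⟩
          rw [hr.1]; push_cast; ring
      · intro h j hj
        have hr := h (j + 1) (by simpa using Nat.succ_lt_succ hj)
        simp only [List.getElem_cons_succ] at hr
        refine ⟨?_, hr.2⟩
        rw [hr.1]; push_cast; ring

-- the Int list [0, …, 31]
def pvR32 : List Int := PySem.List.pyRange 0 32

lemma pvR32_nodup : pvR32.Nodup := by decide

lemma pvR32_getElem (j : Nat) (hj : j < pvR32.length) : pvR32[j] = (j : Int) := by
  have h32 : j < 32 := by simpa [pvR32] using hj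
  interval_cases j <;> rfl

-- A's sorted scan (phrased as 'the keys of the sorted list are [0..31]') iff B's set equality
lemma key_perm_iff (fields : List (List (String × Int))) (h32 : fields.length = 32) :
    List.map pvLsb (PySem.List.sorted fields pvLsb) = pvR32 ↔
      PySem.Set.equal (PySem.Set.ofList (fields.map pvLsb))
        (PySem.Set.ofList pvR32) = true := by
  have hperm : (List.map pvLsb (PySem.List.sorted fields pvLsb)).Perm (fields.map pvLsb) :=
    List.Perm.map pvLsb (PySem.List.sorted_perm fields pvLsb false)
  constructor
  · intro h
    have hp : (fields.map pvLsb).Perm pvR32 := (h ▸ hperm).symm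
    rw [PySem.Set.equal_iff]
    intro x
    rw [PySem.Set.mem_ofList, PySem.Set.mem_ofList]
    exact hp.mem_iff
  · intro h
    rw [PySem.Set.equal_iff] at h
    have hsub : pvR32 ⊆ fields.map pvLsb := by
      intro x hx
      have := h x
      rw [PySem.Set.mem_ofList, PySem.Set.mem_ofList] at this
      exact this.mpr hx
    have hlen : (fields.map pvLsb).length ≤ pvR32.length := by
      rw [List.length_map, h32]; decide
    have hp : pvR32.Perm (fields.map pvLsb) :=
      (pvR32_nodup.subperm hsub).perm_of_length_le hlen
    exact List.Perm.eq_of_pairwise (fun a b _ _ hab hba => le_antisymm hab hba)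
      (PySem.List.sorted_map_key_pairwise fields pvLsb)
      (by decide) (hperm.trans hp.symm)

-- the 32-field branches of the two ports agree
lemma branch32_eq (fields : List (List (String × Int))) (h32 : fields.length = 32) :
    pvALoop32 0 (PySem.List.sorted fields (fun field => (List.lookup "lsb" field).getD 0)) =
      (fields.all (fun field => (List.lookup "width" field).getD 0 == 1) &&
        PySem.Set.equal
          (PySem.Set.ofList (fields.map (fun field => (List.lookup "lsb" field).getD 0)))
          (PySem.Set.ofList (PySem.List.pyRange 0 32))) := by
  have hkey : (fun field => (List.lookup "lsb" field).getD 0) = pvLsb := rfl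
  have hwid : (fun field => (List.lookup "width" field).getD 0 == (1:Int)) =
      (fun field => pvWidth field == 1) := rfl
  have hR : PySem.List.pyRange 0 32 = pvR32 := rfl
  rw [hkey, hwid, hR]
  have hslen : (PySem.List.sorted fields pvLsb).length = 32 := by
    rw [PySem.List.length_sorted]; exact h32
  rw [Bool.eq_iff_iff, pvALoop32_iff, Bool.and_eq_true, List.all_eq_true]
  constructor
  · intro h
    constructor
    · intro f hf
      have hf' : f ∈ PySem.List.sorted fields pvLsb :=
        (PySem.List.mem_sorted _ _ _ _).mpr hf
      obtain ⟨j, hj, rfl⟩ := List.getElem_of_mem hf'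
      exact beq_iff_eq.mpr (h j hj).2
    · rw [← key_perm_iff fields h32]
      apply List.ext_getElem
      · rw [List.length_map, hslen]; decide
      · intro j hj1 hj2
        rw [List.getElem_map, pvR32_getElem j hj2]
        have hj' : j < (PySem.List.sorted fields pvLsb).length := by
          rw [List.length_map] at hj1; exact hj1
        have := (h j hj').1
        rw [this]; ring
  · rintro ⟨hw, hset⟩
    have hkeys : List.map pvLsb (PySem.List.sorted fields pvLsb) = pvR32 :=
      (key_perm_iff fields h32).mpr hset
    intro j hj
    constructor
    · have hj1 : j < (List.map pvLsb (PySem.List.sorted fields pvLsb)).length := by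
        rw [List.length_map]; exact hj
      have hj2 : j < pvR32.length := by rw [← hkeys]; exact hj1
      have hx : (List.map pvLsb (PySem.List.sorted fields pvLsb))[j]'hj1 = pvR32[j]'hj2 :=
        List.getElem_of_eq hkeys hj1
      rw [List.getElem_map] at hx
      rw [hx, pvR32_getElem j hj2]; ring
    · have hmem : (PySem.List.sorted fields pvLsb)[j] ∈ fields :=
        (PySem.List.mem_sorted _ _ _ _).mp (List.getElem_mem hj)
      exact beq_iff_eq.mp (hw _ hmem)

-- ===== VERDICT (by name: the statement is the Claim_ definition above) =====
theorem register_is_u32_repr_spec : Claim_equal_register_is_u32_repr := by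
  intro reg _ _
  unfold Spec_register_is_u32_repr register_is_u32_repr register_is_u32_repr_alt
    fields_ascending_by_lsb
  set fields := (List.lookup "fields" reg).getD [] with hf
  by_cases h1 : fields.length = 1
  · have h32 : ¬ fields.length = 32 := by omega
    by_cases hw : (List.lookup "width" (fields.headD [])).getD 0 = 32
    · simp only [h1, hw, and_true]
      rw [Bool.eq_iff_iff]; simp
    · have hne : ¬ (fields.length = 1 ∧ (List.lookup "width" (fields.headD [])).getD 0 = 32) := by
        intro h; exact hw h.2
      rw [if_neg hne, if_neg (h1 ▸ h32), if_pos h1]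
      rw [List.headD_eq_head?_getD] at hw
      rw [Bool.eq_iff_iff]; simp [hw]
  · by_cases h32 : fields.length = 32
    · have hne : ¬ (fields.length = 1 ∧ (List.lookup "width" (fields.headD [])).getD 0 = 32) := by
        intro h; exact h1 h.1
      rw [if_neg hne, if_pos h32, if_neg h1, if_pos h32]
      exact branch32_eq fields h32
    · simp [h1, h32]
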